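-- pv_equiv track=rewrite | github.com/chaojinn/bookcastai | agent/chunkrizer.py | _split_chunk_at_delimiter
-- ===== SOURCE A (Python) =====
-- from typing import List
--
-- def _split_chunk_at_delimiter(text: str, upper_size: int) -> List[str]:
--     """Split an oversized chunk at the comma/semicolon nearest the midpoint."""
--     stripped = text.strip()
--     if len(stripped) <= upper_size:
--         return [stripped] if stripped else []
--
--     mid = len(stripped) // 2
--     split_points = [idx for idx, ch in enumerate(stripped) if ch in {",", ";"}]
--     if not split_points:
--         return [stripped] if stripped else []
--
--     split_idx = min(split_points, key=lambda idx: abs(idx - mid))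
--     left = stripped[: split_idx + 1].strip()
--     right = stripped[split_idx + 1 :].strip()
--
--     parts: List[str] = []
--     if left:
--         parts.append(left)
--     if right:
--         parts.append(right)
--     return parts
-- ===== SOURCE B (Python) =====
-- from typing import List
--
-- def _split_chunk_at_delimiter(text: str, upper_size: int) -> List[str]:
--     """Split an oversized chunk at the comma/semicolon nearest the midpoint,
--     found by an expanding search outward from the midpoint (left wins ties)."""
--     stripped = text.strip()
--     if len(stripped) <= upper_size:
--         return [stripped] if stripped else []
--
--     n = len(stripped)
--     mid = n // 2
--     split_idx = -1
--     for d in range(n + 1):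
--         if 0 <= mid - d < n and stripped[mid - d] in ",;":
--             split_idx = mid - d
--             break
--         if 0 <= mid + d < n and stripped[mid + d] in ",;":
--             split_idx = mid + d
--             break
--     if split_idx < 0:
--         return [stripped] if stripped else []
--
--     left = stripped[: split_idx + 1].strip()
--     right = stripped[split_idx + 1 :].strip()
--     return [p for p in (left, right) if p]
-- ===== Notes on version B (the rewrite author's own statement) =====
-- stated objective: alternative
-- what changed: A collects every comma/semicolon index in the whole string and then selects the one minimizing distance to the midpoint with min(key=...); B never builds that list: it searches outward from the midpoint with expanding distance d = 0,1,2,... (testing mid-d before mid+d so ties still break to the left) and stops at the first delimiter found.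
import Mathlib
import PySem

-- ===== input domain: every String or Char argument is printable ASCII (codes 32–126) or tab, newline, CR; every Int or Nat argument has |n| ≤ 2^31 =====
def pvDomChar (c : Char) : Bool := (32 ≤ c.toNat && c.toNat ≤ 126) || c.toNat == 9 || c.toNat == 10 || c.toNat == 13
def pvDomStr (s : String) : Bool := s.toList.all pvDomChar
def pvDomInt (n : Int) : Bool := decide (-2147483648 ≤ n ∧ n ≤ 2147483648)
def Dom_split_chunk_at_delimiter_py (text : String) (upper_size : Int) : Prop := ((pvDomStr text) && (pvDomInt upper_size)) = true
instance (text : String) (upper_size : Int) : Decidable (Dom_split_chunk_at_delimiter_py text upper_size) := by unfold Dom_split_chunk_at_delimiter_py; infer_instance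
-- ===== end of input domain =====

-- B replaces A's collect-all-delimiters-then-min pass by an expanding centered search
-- outward from the midpoint that stops at the first delimiter found (objective: alternative).

-- ch in {",", ";"}  /  ch in ",;"
def pvIsDelim (c : Char) : Bool := c == ',' || c == ';'

-- stripped[i] in ",;" (guarded in-range by the caller; none = out of range ⇒ false)
def pvDelimAt (cs : List Char) (i : Int) : Bool :=
  match PySem.List.pyGet? cs i with
  | some c => pvIsDelim c
  | none => false

-- ===== PORT A =====
def split_chunk_at_delimiter_py (text : String) (upper_size : Int) : List String :=
  let stripped := PySem.Str.strip text
  if PySem.Str.len stripped ≤ upper_size then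
    (if stripped ≠ "" then [stripped] else [])
  else
    let mid := PySem.Int.floordiv (PySem.Str.len stripped) 2
    let split_points := (PySem.List.enumerate stripped.toList 0).foldl
        (fun acc p => if pvIsDelim p.2 then acc ++ [p.1] else acc) []
    if split_points = [] then (if stripped ≠ "" then [stripped] else [])
    else
      match PySem.List.min? split_points (fun idx => |idx - mid|) with
      | none => []   -- unreachable: split_points ≠ []
      | some split_idx =>
        let left := PySem.Str.strip (PySem.Str.slice stripped none (some (split_idx + 1)))
        let right := PySem.Str.strip (PySem.Str.slice stripped (some (split_idx + 1)) none)
        (if left ≠ "" then [left] else []) ++ (if right ≠ "" then [right] else [])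

-- ===== PORT B =====
-- the 'for d in range(n + 1): … break' loop of Source B, fuel = number of remaining iterations
def pvCenterSearch (cs : List Char) (mid n : Int) : Int → Nat → Int
  | _, 0 => -1
  | d, fuel + 1 =>
    if 0 ≤ mid - d ∧ mid - d < n ∧ pvDelimAt cs (mid - d) = true then mid - d
    else if 0 ≤ mid + d ∧ mid + d < n ∧ pvDelimAt cs (mid + d) = true then mid + d
    else pvCenterSearch cs mid n (d + 1) fuel

def split_chunk_at_delimiter_py_alt (text : String) (upper_size : Int) : List String :=
  let stripped := PySem.Str.strip text
  if PySem.Str.len stripped ≤ upper_size then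
    (if stripped ≠ "" then [stripped] else [])
  else
    let n := PySem.Str.len stripped
    let mid := PySem.Int.floordiv n 2
    let split_idx := pvCenterSearch stripped.toList mid n 0 (n.toNat + 1)
    if split_idx < 0 then (if stripped ≠ "" then [stripped] else [])
    else
      let left := PySem.Str.strip (PySem.Str.slice stripped none (some (split_idx + 1)))
      let right := PySem.Str.strip (PySem.Str.slice stripped (some (split_idx + 1)) none)
      [left, right].filter (fun p => p ≠ "")

-- ===== PRECONDITION & SPEC =====
def Spec_split_chunk_at_delimiter_py (text : String) (upper_size : Int) (out : List String) : Prop := out = split_chunk_at_delimiter_py_alt text upper_size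
instance (text : String) (upper_size : Int) (out : List String) : Decidable (Spec_split_chunk_at_delimiter_py text upper_size out) := by unfold Spec_split_chunk_at_delimiter_py; infer_instance

-- ===== CLAIM (what is proved, stated in full; the proofs are below) =====
def Claim_equal_split_chunk_at_delimiter_py : Prop := ∀ (text : String) (upper_size : Int), Dom_split_chunk_at_delimiter_py text upper_size → Spec_split_chunk_at_delimiter_py text upper_size (split_chunk_at_delimiter_py text upper_size)

-- ===== LEMMAS AND PROOFS =====

-- A's list of delimiter indices
def pvSP (cs : List Char) : List Int :=
  ((PySem.List.enumerate cs 0).filter (fun p => pvIsDelim p.2)).map (·.1)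

-- "j is the delimiter index A's min picks": nearest to mid, leftmost on ties
def pvGood (cs : List Char) (mid j : Int) : Prop :=
  (0 ≤ j ∧ j < (cs.length : Int) ∧ pvDelimAt cs j = true) ∧
  ∀ i : Int, 0 ≤ i → i < (cs.length : Int) → pvDelimAt cs i = true →
    (|j - mid| < |i - mid| ∨ (|j - mid| = |i - mid| ∧ j ≤ i))

lemma pvSP_eq_foldl (cs : List Char) :
    (PySem.List.enumerate cs 0).foldl
      (fun acc p => if pvIsDelim p.2 then acc ++ [p.1] else acc) [] = pvSP cs := by
  simpa [pvSP] using
    PySem.List.foldl_append_if (fun p : Int × Char => pvIsDelim p.2) (·.1)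
      (PySem.List.enumerate cs 0) []

lemma mem_pvSP (cs : List Char) (j : Int) :
    j ∈ pvSP cs ↔ (0 ≤ j ∧ j < (cs.length : Int) ∧ pvDelimAt cs j = true) := by
  constructor
  · intro h
    rcases List.mem_map.mp h with ⟨p, hp, rfl⟩
    rcases List.mem_filter.mp hp with ⟨hen, hdel⟩
    rcases (PySem.List.mem_enumerate_iff cs 0 p).mp hen with ⟨k, hk, rfl⟩
    refine ⟨by simp, by simpa using Int.ofNat_lt.mpr hk, ?_⟩
    have : PySem.List.pyGet? cs ((0 : Int) + k) = cs[k]? := by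
      simpa using PySem.List.pyGet?_natCast cs k
    simp only [pvDelimAt, this, List.getElem?_eq_getElem hk]
    simpa using hdel
  · rintro ⟨h0, hlt, hdel⟩
    have hk : j.toNat < cs.length := by omega
    have hj : (j.toNat : Int) = j := Int.toNat_of_nonneg h0
    have hget : PySem.List.pyGet? cs j = some cs[j.toNat] := by
      have := PySem.List.pyGet?_natCast cs j.toNat
      rw [hj] at this
      rw [this, List.getElem?_eq_getElem hk]
    have hdel' : pvIsDelim cs[j.toNat] = true := by
      simpa [pvDelimAt, hget] using hdel
    refine List.mem_map.mpr ⟨(j, cs[j.toNat]), List.mem_filter.mpr ⟨?_, hdel'⟩, rfl⟩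
    exact (PySem.List.mem_enumerate_iff cs 0 _).mpr ⟨j.toNat, hk, by simp [hj]⟩

lemma pvSP_pairwise (cs : List Char) : (pvSP cs).Pairwise (· < ·) := by
  have h1 : ((PySem.List.enumerate cs 0).filter (fun p => pvIsDelim p.2)).Pairwise
      (fun p q => p.1 < q.1) :=
    (PySem.List.pairwise_lt_enumerate cs 0).sublist (List.filter_sublist)
  exact List.pairwise_map.mpr h1

-- min? keeps the FIRST minimal element: everything strictly before it has strictly larger key
lemma pvMin?_spec {α : Type} (key : α → Int) :
    ∀ (xs : List α) (a : α), ∃ l r m, PySem.List.min? (a :: xs) key = some m ∧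
      a :: xs = l ++ m :: r ∧ (∀ y ∈ l, key m < key y) ∧ (∀ y ∈ a :: xs, key m ≤ key y) := by
  intro xs
  induction xs with
  | nil =>
    intro a
    exact ⟨[], [], a, by simp [PySem.List.min?], rfl, by simp, by simp⟩
  | cons x xs ih =>
    intro a
    by_cases h : key x < key a
    · have hstep : PySem.List.min? (a :: x :: xs) key = PySem.List.min? (x :: xs) key := by
        simp [PySem.List.min?, List.foldl, h]
      rcases ih x with ⟨l, r, m, hmin, hdec, hl, hall⟩
      have hmx : key m ≤ key x := hall x (by simp)
      refine ⟨a :: l, r, m, by rw [hstep]; exact hmin, by simp [hdec], ?_, ?_⟩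
      · intro y hy
        rcases List.mem_cons.mp hy with rfl | hy
        · exact lt_of_le_of_lt hmx h
        · exact hl y hy
      · intro y hy
        rcases List.mem_cons.mp hy with rfl | hy
        · exact le_of_lt (lt_of_le_of_lt hmx h)
        · exact hall y hy
    · have hstep : PySem.List.min? (a :: x :: xs) key = PySem.List.min? (a :: xs) key := by
        simp [PySem.List.min?, List.foldl, h]
      have hax : key a ≤ key x := le_of_not_gt h
      rcases ih a with ⟨l, r, m, hmin, hdec, hl, hall⟩
      cases l with
      | nil =>
        have hma : m = a := by
          have h' : a = m := by simpa using congrArg (fun t => t.head?) hdec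
          exact h'.symm
        have hr : xs = r := by simpa [hma] using hdec
        subst hma
        refine ⟨[], x :: r, m, by rw [hstep]; exact hmin, by simp [hr], by simp, ?_⟩
        intro y hy
        rcases List.mem_cons.mp hy with rfl | hy
        · exact le_refl _
        · rcases List.mem_cons.mp hy with rfl | hy
          · exact hax
          · exact hall y (List.mem_cons_of_mem _ hy)
      | cons b l' =>
        have hba : b = a := by
          have h' : a = b := by simpa using congrArg (fun t => t.head?) hdec
          exact h'.symm
        subst hba
        have hxs : xs = l' ++ m :: r := by simpa using hdec
        have hmb : key m < key b := hl b (by simp)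
        refine ⟨b :: x :: l', r, m, by rw [hstep]; exact hmin, by simp [hxs], ?_, ?_⟩
        · intro y hy
          rcases List.mem_cons.mp hy with rfl | hy
          · exact hmb
          · rcases List.mem_cons.mp hy with rfl | hy
            · exact lt_of_lt_of_le hmb hax
            · exact hl y (List.mem_cons_of_mem _ hy)
        · intro y hy
          rcases List.mem_cons.mp hy with rfl | hy
          · exact hall y (by simp)
          · rcases List.mem_cons.mp hy with rfl | hy
            · exact le_of_lt (lt_of_lt_of_le hmb hax)
            · exact hall y (List.mem_cons_of_mem _ hy)

-- A's minimum is pvGood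
lemma pvMin_good (cs : List Char) (mid m : Int)
    (h : PySem.List.min? (pvSP cs) (fun idx => |idx - mid|) = some m) :
    pvGood cs mid m := by
  have hmem : m ∈ pvSP cs := PySem.List.min?_mem h
  refine ⟨(mem_pvSP cs m).mp hmem, ?_⟩
  intro i h0 hlt hdel
  have hi : i ∈ pvSP cs := (mem_pvSP cs i).mpr ⟨h0, hlt, hdel⟩
  have hle : |m - mid| ≤ |i - mid| := by
    cases hsp : pvSP cs with
    | nil => exact absurd (hsp ▸ hmem) (List.not_mem_nil)
    | cons a t =>
      rcases pvMin?_spec (fun idx => |idx - mid|) t a with ⟨l, r, m', hmin, _, _, hall⟩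
      have : m' = m := by
        have := hsp ▸ h
        rw [hmin] at this; exact Option.some.inj this
      subst this
      exact hall i (hsp ▸ hi)
  rcases lt_or_eq_of_le hle with hlt' | heq
  · exact Or.inl hlt'
  · refine Or.inr ⟨heq, ?_⟩
    cases hsp : pvSP cs with
    | nil => exact absurd (hsp ▸ hmem) (List.not_mem_nil)
    | cons a t =>
      rcases pvMin?_spec (fun idx => |idx - mid|) t a with ⟨l, r, m', hmin, hdec, hl, _⟩
      have hm' : m' = m := by
        have := hsp ▸ h
        rw [hmin] at this; exact Option.some.inj this
      rw [hm'] at hdec hl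
      have hpw : (l ++ m :: r).Pairwise (· < ·) := by
        have := pvSP_pairwise cs
        rw [hsp, hdec] at this; exact this
      have hi' : i ∈ l ++ m :: r := by
        have := hsp ▸ hi
        rw [hdec] at this; exact this
      rcases List.mem_append.mp hi' with hil | hir
      · exact absurd heq (by have := hl i hil; simp at this ⊢; linarith)
      · rcases List.mem_cons.mp hir with rfl | hir
        · exact le_refl _
        · have : m < i := (List.pairwise_cons.mp (List.pairwise_append.mp hpw).2.1).1 i hir
          exact le_of_lt this

-- B's centered search: either finds a pvGood index, or reports -1 with no delimiter within reach
lemma pvSearch_spec (cs : List Char) (mid : Int) :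
    ∀ (fuel : Nat) (d : Int), 0 ≤ d →
      (∀ i : Int, 0 ≤ i → i < (cs.length : Int) → pvDelimAt cs i = true → d ≤ |i - mid|) →
      (pvCenterSearch cs mid (cs.length : Int) d fuel = -1 ∧
        ∀ i : Int, 0 ≤ i → i < (cs.length : Int) → pvDelimAt cs i = true → d + fuel ≤ |i - mid|)
      ∨ (∃ j, pvCenterSearch cs mid (cs.length : Int) d fuel = j ∧ pvGood cs mid j) := by
  intro fuel
  induction fuel with
  | zero =>
    intro d _ hprev
    exact Or.inl ⟨rfl, fun i h0 hlt hdel => by simpa using hprev i h0 hlt hdel⟩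
  | succ fuel ih =>
    intro d hd hprev
    have habs1 : |mid - d - mid| = d := by
      have h1 : mid - d - mid = -d := by ring
      rw [h1, abs_neg, abs_of_nonneg hd]
    have habs2 : |mid + d - mid| = d := by
      have h1 : mid + d - mid = d := by ring
      rw [h1, abs_of_nonneg hd]
    by_cases h1 : 0 ≤ mid - d ∧ mid - d < (cs.length : Int) ∧ pvDelimAt cs (mid - d) = true
    · refine Or.inr ⟨mid - d, ?_, ⟨h1, ?_⟩⟩
      · simp only [pvCenterSearch]; rw [if_pos h1]
      · intro i h0 hlt hdel
        rcases lt_or_eq_of_le (hprev i h0 hlt hdel) with h' | h'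
        · exact Or.inl (by rw [habs1]; exact h')
        · refine Or.inr ⟨by rw [habs1]; exact h', ?_⟩
          rcases (abs_eq hd).mp h'.symm with he | he <;> omega
    · by_cases h2 : 0 ≤ mid + d ∧ mid + d < (cs.length : Int) ∧ pvDelimAt cs (mid + d) = true
      · refine Or.inr ⟨mid + d, ?_, ⟨h2, ?_⟩⟩
        · simp only [pvCenterSearch]; rw [if_neg h1, if_pos h2]
        · intro i h0 hlt hdel
          rcases lt_or_eq_of_le (hprev i h0 hlt hdel) with h' | h'
          · exact Or.inl (by rw [habs2]; exact h')
          · refine Or.inr ⟨by rw [habs2]; exact h', ?_⟩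
            rcases (abs_eq hd).mp h'.symm with he | he
            · omega
            · have hi : i = mid - d := by omega
              subst hi
              exact absurd ⟨h0, hlt, hdel⟩ h1
      · have hnext : ∀ i : Int, 0 ≤ i → i < (cs.length : Int) → pvDelimAt cs i = true →
            d + 1 ≤ |i - mid| := by
          intro i h0 hlt hdel
          rcases lt_or_eq_of_le (hprev i h0 hlt hdel) with h' | h'
          · exact Int.add_one_le_iff.mpr h'
          · exfalso
            rcases (abs_eq hd).mp h'.symm with he | he
            · have hi : i = mid + d := by omega
              subst hi
              exact h2 ⟨h0, hlt, hdel⟩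
            · have hi : i = mid - d := by omega
              subst hi
              exact h1 ⟨h0, hlt, hdel⟩
        have hrec : pvCenterSearch cs mid (cs.length : Int) d (fuel + 1)
            = pvCenterSearch cs mid (cs.length : Int) (d + 1) fuel := by
          simp only [pvCenterSearch]; rw [if_neg h1, if_neg h2]
        rcases ih (d + 1) (by omega) hnext with ⟨hres, hall⟩ | ⟨j, hres, hgood⟩
        · refine Or.inl ⟨hrec ▸ hres, fun i h0 hlt hdel => ?_⟩
          have := hall i h0 hlt hdel
          have hc : ((fuel + 1 : Nat) : Int) = (fuel : Int) + 1 := by push_cast; ring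
          rw [hc]
          linarith
        · exact Or.inr ⟨j, hrec ▸ hres, hgood⟩

-- the nearest-leftmost delimiter is unique
lemma pvGood_unique (cs : List Char) (mid j1 j2 : Int)
    (h1 : pvGood cs mid j1) (h2 : pvGood cs mid j2) : j1 = j2 := by
  rcases h1 with ⟨⟨h10, h1l, h1d⟩, hmin1⟩
  rcases h2 with ⟨⟨h20, h2l, h2d⟩, hmin2⟩
  rcases hmin1 j2 h20 h2l h2d with ha | ⟨ha, ha'⟩ <;>
    rcases hmin2 j1 h10 h1l h1d with hb | ⟨hb, hb'⟩
  · linarith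
  · linarith
  · linarith
  · omega

lemma pvMid_eq (n : Nat) : PySem.Int.floordiv (n : Int) 2 = ((n / 2 : Nat) : Int) := by
  cases n with
  | zero => rfl
  | succ m => rfl

lemma pvFilter_pair (left right : String) :
    (if left ≠ "" then [left] else []) ++ (if right ≠ "" then [right] else [])
      = [left, right].filter (fun p => p ≠ "") := by
  by_cases hl : left = "" <;> by_cases hr : right = "" <;> simp [hl, hr]

-- ===== VERDICT (by name: the statement is the Claim_ definition above) =====
set_option maxHeartbeats 2000000 in
theorem split_chunk_at_delimiter_py_spec : Claim_equal_split_chunk_at_delimiter_py := by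
  intro text upper_size _
  unfold Spec_split_chunk_at_delimiter_py
  by_cases hsz : PySem.Str.len (PySem.Str.strip text) ≤ upper_size
  · show split_chunk_at_delimiter_py text upper_size = _
    unfold split_chunk_at_delimiter_py split_chunk_at_delimiter_py_alt
    rw [if_pos hsz, if_pos hsz]
  · show split_chunk_at_delimiter_py text upper_size = _
    unfold split_chunk_at_delimiter_py split_chunk_at_delimiter_py_alt
    rw [if_neg hsz, if_neg hsz]
    set stripped := PySem.Str.strip text with hstr
    set cs := stripped.toList with hcs
    have hlen : PySem.Str.len stripped = (cs.length : Int) := by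
      simpa [hcs] using PySem.Str.len_eq stripped
    have hfold : (PySem.List.enumerate cs 0).foldl
        (fun acc p => if pvIsDelim p.2 then acc ++ [p.1] else acc) [] = pvSP cs :=
      pvSP_eq_foldl cs
    have hm0 : (0 : Int) ≤ ((cs.length / 2 : Nat) : Int) := Int.natCast_nonneg _
    have hmle : ((cs.length / 2 : Nat) : Int) ≤ (cs.length : Int) := by
      exact_mod_cast Nat.div_le_self cs.length 2
    simp only [hlen, hfold, Int.toNat_natCast, pvMid_eq]
    rcases pvSearch_spec cs ((cs.length / 2 : Nat) : Int) (cs.length + 1) 0 le_rfl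
      (fun i _ _ _ => abs_nonneg _) with ⟨hres, hnone⟩ | ⟨j, hres, hgood⟩
    · -- search found nothing: there is no delimiter at all, both take the fallback branch
      have hempty : pvSP cs = [] := by
        cases hsp : pvSP cs with
        | nil => rfl
        | cons a t =>
          exfalso
          have ha : a ∈ pvSP cs := by rw [hsp]; exact List.mem_cons_self
          rcases (mem_pvSP cs a).mp ha with ⟨ha0, halt, hadel⟩
          have h1 := hnone a ha0 halt hadel
          have h2 : |a - ((cs.length / 2 : Nat) : Int)| ≤ (cs.length : Int) :=
            abs_le.mpr ⟨by omega, by omega⟩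
          have h3 : ((cs.length + 1 : Nat) : Int) = (cs.length : Int) + 1 := by push_cast; ring
          rw [h3] at h1
          linarith
      rw [hres, hempty]
      norm_num
    · -- search found j; A's min? must return some m, and uniqueness gives m = j
      obtain ⟨⟨hj0, hjlt, hjdel⟩, _⟩ := hgood
      cases hmin : PySem.List.min? (pvSP cs)
          (fun idx => |idx - ((cs.length / 2 : Nat) : Int)|) with
      | none =>
        exfalso
        have hempty : pvSP cs = [] := (PySem.List.min?_eq_none_iff _ _).mp hmin
        have hj : j ∈ pvSP cs := (mem_pvSP cs j).mpr ⟨hj0, hjlt, hjdel⟩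
        rw [hempty] at hj
        exact List.not_mem_nil hj
      | some m =>
        have hne : ¬ pvSP cs = [] := by
          intro h
          rw [h] at hmin
          simp [PySem.List.min?] at hmin
        have hgoodm : pvGood cs ((cs.length / 2 : Nat) : Int) m := pvMin_good cs _ m hmin
        have hjm : m = j := pvGood_unique cs _ m j hgoodm ⟨⟨hj0, hjlt, hjdel⟩, ‹_›⟩
        rw [hres, if_neg hne, if_neg (by omega : ¬ j < 0), hjm]
        exact pvFilter_pair _ _
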